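-- pv_equiv track=rewrite | github.com/dachidahu/SC2AgentsZoo2 | agent_TLeagueFormal14/TImitate/timitate/sandbox/split_tr_val2.py | make_rep_name_player_id_dict
-- ===== SOURCE A (Python) =====
-- def make_rep_name_player_id_dict(items):
--   d = {}
--   for each in items:
--     rn, pid = each.split('-')
--     if rn in d:
--       d[rn].append(pid)
--     else:
--       d[rn] = [pid]
--   return d
-- ===== SOURCE B (Python) =====
-- def make_rep_name_player_id_dict(items):
--   pairs = []
--   for each in items:
--     rn, pid = each.split('-')
--     pairs.append((rn, pid))
--   keys = list(dict.fromkeys(rn for rn, _ in pairs))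
--   return {k: [pid for rn, pid in pairs if rn == k] for k in keys}
-- ===== Notes on version B (the rewrite author's own statement) =====
-- stated objective: alternative
-- what changed: Replaces the single hash-accumulate pass (append to the entry or create it) by a two-phase strategy: first map items to (rn, pid) pairs, then dedupe the keys in first-occurrence order and build each group's pid list with one filtering scan per distinct key.
import Mathlib
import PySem

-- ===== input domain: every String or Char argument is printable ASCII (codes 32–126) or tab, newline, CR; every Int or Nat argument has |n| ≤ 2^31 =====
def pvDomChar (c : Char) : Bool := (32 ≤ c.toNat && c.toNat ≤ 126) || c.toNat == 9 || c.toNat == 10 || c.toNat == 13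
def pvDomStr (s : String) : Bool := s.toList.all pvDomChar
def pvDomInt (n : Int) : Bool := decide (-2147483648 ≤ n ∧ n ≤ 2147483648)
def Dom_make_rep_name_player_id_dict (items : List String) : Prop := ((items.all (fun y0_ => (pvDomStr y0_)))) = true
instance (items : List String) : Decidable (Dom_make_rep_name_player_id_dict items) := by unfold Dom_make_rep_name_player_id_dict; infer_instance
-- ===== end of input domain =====

-- B groups the (rn, pid) pairs by deduped keys with one filtering scan per distinct key,
-- instead of A's hash-accumulate single pass; same return value, no speed claim.

-- shared step: rn, pid = each.split('-')  (both Pythons do exactly this unpacking)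
def pvSplit2 (s : String) : String × String :=
  let parts := (PySem.Str.split? s "-").getD []
  (parts.getD 0 "", parts.getD 1 "")

-- ===== PORT A =====
def make_rep_name_player_id_dict (items : List String) : List (String × List String) :=
  (items.foldl (fun d each =>
      let p := pvSplit2 each
      if d.contains p.1 then d.modify p.1 [] (fun l => l ++ [p.2])
      else d.insert p.1 [p.2]) PySem.Dict.empty).items

-- ===== PORT B =====
def make_rep_name_player_id_dict_alt (items : List String) : List (String × List String) :=
  let pairs := items.map pvSplit2
  let keys := PySem.List.dedup (pairs.map (·.1))
  (keys.foldl (fun d k =>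
      d.insert k ((pairs.filter (fun p => p.1 == k)).map (·.2))) PySem.Dict.empty).items

-- ===== PRECONDITION & SPEC =====
-- Pre_ excludes exactly the items whose split('-') has ≠ 2 parts, where Python A (and B) raise ValueError.
def Pre_make_rep_name_player_id_dict (items : List String) : Prop :=
  (items.all (fun s => ((PySem.Str.split? s "-").getD []).length == 2)) = true
instance (items : List String) : Decidable (Pre_make_rep_name_player_id_dict items) := by
  unfold Pre_make_rep_name_player_id_dict; infer_instance
def pvWitness_make_rep_name_player_id_dict : List String := ["a-1", "b-2", "a-3"]
def Spec_make_rep_name_player_id_dict (items : List String) (out : List (String × List String)) : Prop := out = make_rep_name_player_id_dict_alt items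
instance (items : List String) (out : List (String × List String)) : Decidable (Spec_make_rep_name_player_id_dict items out) := by unfold Spec_make_rep_name_player_id_dict; infer_instance

-- ===== CLAIM (what is proved, stated in full; the proofs are below) =====
def Claim_equal_make_rep_name_player_id_dict : Prop := ∀ (items : List String), Dom_make_rep_name_player_id_dict items → Pre_make_rep_name_player_id_dict items → Spec_make_rep_name_player_id_dict items (make_rep_name_player_id_dict items)

-- ===== LEMMAS AND PROOFS =====

-- A's branch (append to the existing entry / create a fresh one) is one dict.modify step.
theorem pv_branch_eq_modify (d : PySem.Dict String (List String)) (p : String × String) :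
    (if d.contains p.1 then d.modify p.1 [] (fun l => l ++ [p.2]) else d.insert p.1 [p.2])
      = d.modify p.1 [] (fun l => l ++ [p.2]) := by
  by_cases h : d.contains p.1
  · simp [h]
  · simp only [Bool.not_eq_true] at h
    simp [h, PySem.Dict.modify, PySem.Dict.insert, PySem.Dict.getD_of_not_contains _ _ h]

-- A's whole loop, as a fold of modify steps over the (rn, pid) pairs.
theorem pv_A_eq_modify_fold (items : List String) :
    make_rep_name_player_id_dict items
      = ((items.map pvSplit2).foldl
          (fun d p => d.modify p.1 [] (fun l => l ++ [p.2])) PySem.Dict.empty).items := by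
  unfold make_rep_name_player_id_dict
  rw [List.foldl_map]
  have hfun : (fun (d : PySem.Dict String (List String)) (each : String) =>
        if d.contains (pvSplit2 each).1 then d.modify (pvSplit2 each).1 [] (fun l => l ++ [(pvSplit2 each).2])
        else d.insert (pvSplit2 each).1 [(pvSplit2 each).2])
      = fun d each => d.modify (pvSplit2 each).1 [] (fun l => l ++ [(pvSplit2 each).2]) := by
    funext d each; exact pv_branch_eq_modify d (pvSplit2 each)
  simp only [hfun]

theorem pv_spec_aux (items : List String) :
    make_rep_name_player_id_dict items = make_rep_name_player_id_dict_alt items := by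
  rw [pv_A_eq_modify_fold]
  unfold make_rep_name_player_id_dict_alt
  set pairs := items.map pvSplit2 with hpairs
  set M := pairs.foldl (fun d p => d.modify p.1 [] (fun l => l ++ [p.2])) PySem.Dict.empty with hM
  have hkeys : M.keys = PySem.List.dedup (pairs.map (·.1)) := by
    rw [hM, PySem.Dict.keys_foldl_modify_key pairs (·.1) [] (fun _ p l => l ++ [p.2])]
    simp [PySem.Dict.keys_empty, PySem.Set.update_nil_left]
  have hnd : M.keys.Nodup := by
    rw [hkeys]; exact PySem.List.nodup_dedup _
  have hB : (((PySem.List.dedup (pairs.map (·.1))).foldl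
        (fun d k => d.insert k ((pairs.filter (fun p => p.1 == k)).map (·.2)))
        PySem.Dict.empty)).items
      = (PySem.List.dedup (pairs.map (·.1))).map
          (fun k => (k, (pairs.filter (fun p => p.1 == k)).map (·.2))) := by
    have h1 : ∀ a ∈ PySem.List.dedup (pairs.map (·.1)),
        (PySem.Dict.empty : PySem.Dict String (List String)).contains (id a) = false := by
      intro a _; exact PySem.Dict.contains_empty a
    have h2 : ((PySem.List.dedup (pairs.map (·.1))).map id).Nodup := by
      simpa using PySem.List.nodup_dedup (pairs.map (·.1))
    have := PySem.Dict.items_foldl_insert_fresh (PySem.List.dedup (pairs.map (·.1))) id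
      (fun k => (pairs.filter (fun p => p.1 == k)).map (·.2)) PySem.Dict.empty h1 h2
    simp only [id] at this
    simpa using this
  rw [hB, PySem.Dict.items_eq_map_keys M hnd [], hkeys]
  apply List.map_congr_left
  intro k _
  have := PySem.Dict.getD_foldl_modify_append pairs PySem.Dict.empty k
  rw [← hM] at this
  simp [PySem.Dict.getD_empty] at this
  simp [this]

-- ===== VERDICT (by name: the statement is the Claim_ definition above) =====
theorem make_rep_name_player_id_dict_spec : Claim_equal_make_rep_name_player_id_dict := by
  intro items _ _
  exact pv_spec_aux items
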